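-- pv_equiv track=rewrite | github.com/colorful-diamond/pishkhanak | bots/persian-digits-captcha-solver/captcha_api_production.py | find_most_repeated_color_in_box
-- ===== SOURCE A (Python) =====
-- from collections import Counter
--
-- def find_most_repeated_color_in_box(box_colors, exclude_background=True):
--     """Find the most repeated color in a single box."""
--
--     if not box_colors:
--         return None, 0
--
--     color_counts = Counter(box_colors)
--
--     if exclude_background:
--         # Filter out very light colors (likely background)
--         filtered_counts = {}
--         for color, count in color_counts.items():
--             r, g, b = color
--             if not (r > 200 and g > 200 and b > 200):  # Not very light
--                 filtered_counts[color] = count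
--
--         if filtered_counts:
--             color_counts = Counter(filtered_counts)
--
--     if not color_counts:
--         # If no colors after filtering, return the most common original color
--         color_counts = Counter(box_colors)
--
--     # Get the most common color
--     most_common_color = color_counts.most_common(1)[0]
--     return most_common_color[0], most_common_color[1]
-- ===== SOURCE B (Python) =====
-- def find_most_repeated_color_in_box(box_colors, exclude_background=True):
--     """Find the most repeated color in a single box.
--
--     Sort-based: sort (index, color) pairs by (color, index), then one run-length
--     scan over the sorted list; each run gives a color's count and its first
--     occurrence index, and the best run is picked by (count desc, first asc),
--     which reproduces Counter.most_common(1)'s first-inserted tie-break."""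
--     if not box_colors:
--         return None, 0
--     pairs = sorted(enumerate(box_colors), key=lambda p: (p[1], p[0]))
--
--     def better(run, b):
--         # run = (count, first, color)
--         return b is None or run[0] > b[0] or (run[0] == b[0] and run[1] < b[1])
--
--     def close(run, best, best_nl):
--         if better(run, best):
--             best = run
--         c = run[2]
--         if not (c[0] > 200 and c[1] > 200 and c[2] > 200) and better(run, best_nl):
--             best_nl = run
--         return best, best_nl
--
--     best = None
--     best_nl = None
--     cur = None  # open run (count, first, color)
--     for i, c in pairs:
--         if cur is not None and cur[2] == c:
--             cur = (cur[0] + 1, cur[1], c)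
--         else:
--             if cur is not None:
--                 best, best_nl = close(cur, best, best_nl)
--             cur = (1, i, c)
--     best, best_nl = close(cur, best, best_nl)
--
--     if exclude_background and best_nl is not None:
--         return best_nl[2], best_nl[0]
--     return best[2], best[0]
-- ===== Notes on version B (the rewrite author's own statement) =====
-- stated objective: alternative
-- what changed: Replaces hash-counting (Counter, filtered dict, most_common) with a sort: B sorts (index,color) pairs by (color,index) and does one run-length scan over the sorted list, picking the best run by count with smallest-first-index tie-break, which reproduces most_common(1)'s first-inserted winner.
import Mathlib
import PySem

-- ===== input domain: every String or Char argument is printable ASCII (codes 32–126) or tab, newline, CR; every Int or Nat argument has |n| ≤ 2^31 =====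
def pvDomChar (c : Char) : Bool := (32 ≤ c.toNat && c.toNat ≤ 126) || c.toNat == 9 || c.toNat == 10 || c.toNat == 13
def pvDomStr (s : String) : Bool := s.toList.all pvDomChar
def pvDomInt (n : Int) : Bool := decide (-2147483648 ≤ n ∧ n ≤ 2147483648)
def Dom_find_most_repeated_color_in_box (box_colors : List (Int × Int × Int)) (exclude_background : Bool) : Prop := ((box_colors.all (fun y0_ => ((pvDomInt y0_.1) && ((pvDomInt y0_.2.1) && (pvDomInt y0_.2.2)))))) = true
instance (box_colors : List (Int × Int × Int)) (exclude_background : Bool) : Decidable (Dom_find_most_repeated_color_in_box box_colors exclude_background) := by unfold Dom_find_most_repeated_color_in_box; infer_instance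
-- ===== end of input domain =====

-- B replaces A's hash counting (Counter + filtered dict + most_common) with a sort of the
-- (index, color) pairs by (color, index) followed by one run-length scan (objective: alternative).

-- ===== PORT A =====
-- Counter.most_common(1)[0] = first-inserted entry of maximal count (heapq.nlargest is stable);
-- ported exactly as that first-maximal scan over the items list.
def pvMostCommon1 (l : List ((Int × Int × Int) × Int)) : Option ((Int × Int × Int) × Int) :=
  l.foldl (fun acc p =>
    match acc with
    | none => some p
    | some b => if p.2 > b.2 then some p else some b) none

def find_most_repeated_color_in_box (box_colors : List (Int × Int × Int)) (exclude_background : Bool) : (Option (Int × Int × Int)) × Int :=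
  if box_colors = [] then (none, 0)
  else
    let color_counts := PySem.Dict.counter box_colors
    let color_counts :=
      if exclude_background then
        -- "for color, count in color_counts.items(): if not light: filtered[color] = count"
        let filtered := color_counts.items.foldl
          (fun d p => if !(p.1.1 > 200 && p.1.2.1 > 200 && p.1.2.2 > 200) then d.insert p.1 p.2 else d)
          PySem.Dict.empty
        -- Counter(filtered_counts) is a copy of the dict: same items
        if filtered.items ≠ [] then filtered else color_counts
      else color_counts
    let color_counts := if color_counts.items = [] then PySem.Dict.counter box_colors else color_counts
    match pvMostCommon1 color_counts.items with
    | some p => (some p.1, p.2)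
    | none => (none, 0)

-- ===== PORT B =====
-- a run is (count, first index, color), exactly Python's (count, first, color) triples
abbrev PvRun := Int × Int × (Int × Int × Int)

-- key=lambda p: (p[1], p[0]) — Python tuple comparison is lexicographic, ported as nested Lex
def pvKey (p : Int × (Int × Int × Int)) : Lex (Int × Lex (Int × Lex (Int × Int))) :=
  toLex (p.2.1, toLex (p.2.2.1, toLex (p.2.2.2, p.1)))

def pvLight (c : Int × Int × Int) : Bool := c.1 > 200 && c.2.1 > 200 && c.2.2 > 200

def pvBetter (r : PvRun) (b : Option PvRun) : Bool :=
  match b with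
  | none => true
  | some b => r.1 > b.1 || (r.1 == b.1 && r.2.1 < b.2.1)

def pvClose (r : PvRun) (best best_nl : Option PvRun) : Option PvRun × Option PvRun :=
  let best := if pvBetter r best then some r else best
  let best_nl := if !pvLight r.2.2 && pvBetter r best_nl then some r else best_nl
  (best, best_nl)

def pvStep (s : Option PvRun × Option PvRun × Option PvRun) (p : Int × (Int × Int × Int)) :
    Option PvRun × Option PvRun × Option PvRun :=
  match s.2.2 with
  | some cur =>
    if cur.2.2 == p.2 then (s.1, s.2.1, some (cur.1 + 1, cur.2.1, p.2))
    else
      let bb := pvClose cur s.1 s.2.1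
      (bb.1, bb.2, some (1, p.1, p.2))
  | none => (s.1, s.2.1, some (1, p.1, p.2))

def find_most_repeated_color_in_box_alt (box_colors : List (Int × Int × Int)) (exclude_background : Bool) : (Option (Int × Int × Int)) × Int :=
  if box_colors = [] then (none, 0)
  else
    let pairs := PySem.List.sorted (PySem.List.enumerate box_colors) pvKey false
    let s := pairs.foldl pvStep (none, none, none)
    match s.2.2 with
    | some cur =>
      let bb := pvClose cur s.1 s.2.1
      match (if exclude_background && bb.2.isSome then bb.2 else bb.1) with
      | some r => (some r.2.2, r.1)
      | none => (none, 0)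
    | none => (none, 0)   -- unreachable: box_colors ≠ [] so pairs ≠ []

-- ===== PRECONDITION & SPEC =====
def Spec_find_most_repeated_color_in_box (box_colors : List (Int × Int × Int)) (exclude_background : Bool) (out : (Option (Int × Int × Int)) × Int) : Prop := out = find_most_repeated_color_in_box_alt box_colors exclude_background
instance (box_colors : List (Int × Int × Int)) (exclude_background : Bool) (out : (Option (Int × Int × Int)) × Int) : Decidable (Spec_find_most_repeated_color_in_box box_colors exclude_background out) := by unfold Spec_find_most_repeated_color_in_box; infer_instance

-- ===== CLAIM (what is proved, stated in full; the proofs are below) =====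
def Claim_equal_find_most_repeated_color_in_box : Prop := ∀ (box_colors : List (Int × Int × Int)) (exclude_background : Bool), Dom_find_most_repeated_color_in_box box_colors exclude_background → Spec_find_most_repeated_color_in_box box_colors exclude_background (find_most_repeated_color_in_box box_colors exclude_background)

-- ===== LEMMAS AND PROOFS =====

-- ---- proof-side reference functions ----

-- first-occurrence index of color c in xs, as an Int
def pvFst (xs : List (Int × Int × Int)) (c : Int × Int × Int) : Int :=
  ((PySem.List.index? xs c).getD 0 : Nat)

-- the run a color contributes: (its count in xs, its first index, itself)
def pvTriple (xs : List (Int × Int × Int)) (c : Int × Int × Int) : PvRun :=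
  ((xs.count c : Int), pvFst xs c, c)

def pvUpd (b : Option PvRun) (r : PvRun) : Option PvRun := if pvBetter r b then some r else b

-- reference best-run fold (the "close" update applied to a whole list of runs)
def pvBFold (b : Option PvRun) (L : List PvRun) : Option PvRun := L.foldl pvUpd b

-- reference run decomposition of the tail of the sorted pair list, with open run r
def pvRuns (r : PvRun) : List (Int × (Int × Int × Int)) → List PvRun
  | [] => [r]
  | p :: t => if r.2.2 == p.2 then pvRuns (r.1 + 1, r.2.1, p.2) t else r :: pvRuns (1, p.1, p.2) t

def pvAUpd (acc : Option ((Int × Int × Int) × Int)) (p : (Int × Int × Int) × Int) :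
    Option ((Int × Int × Int) × Int) :=
  match acc with
  | none => some p
  | some b => if p.2 > b.2 then some p else some b

def pvFinish (s : Option PvRun × Option PvRun × Option PvRun) : Option PvRun × Option PvRun :=
  match s.2.2 with
  | some cur => pvClose cur s.1 s.2.1
  | none => (s.1, s.2.1)

def pvIdxFirst (T : List (Int × (Int × Int × Int))) (d : Int × Int × Int) : Int :=
  ((T.find? (fun p => p.2 == d)).map (·.1)).getD 0

def pvColorLt (c d : Int × Int × Int) : Prop :=
  c.1 < d.1 ∨ (c.1 = d.1 ∧ (c.2.1 < d.2.1 ∨ (c.2.1 = d.2.1 ∧ c.2.2 < d.2.2)))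

-- ---- the sort key is the lexicographic (color, index) order ----

theorem pvKey_le_iff (p q : Int × (Int × Int × Int)) :
    pvKey p ≤ pvKey q ↔ (pvColorLt p.2 q.2 ∨ (p.2 = q.2 ∧ p.1 ≤ q.1)) := by
  obtain ⟨i, r, g, b⟩ := p; obtain ⟨j, r', g', b'⟩ := q
  simp only [pvKey, pvColorLt, Prod.Lex.toLex_le_toLex, Prod.mk.injEq]
  constructor <;> (intro h; tauto)

-- ---- B's fold with an open run, reduced to runs + best-fold ----

theorem pvFoldl_step_some (P : List (Int × (Int × Int × Int))) (b bn : Option PvRun) (r : PvRun) :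
    ((P.foldl pvStep (b, bn, some r)).2.2).isSome := by
  induction P generalizing b bn r with
  | nil => rfl
  | cons p t ih =>
    simp only [List.foldl_cons, pvStep]
    split <;> exact ih _ _ _

theorem pvFoldl_finish (P : List (Int × (Int × Int × Int))) (r : PvRun) (b bn : Option PvRun) :
    pvFinish (P.foldl pvStep (b, bn, some r))
      = (pvBFold b (pvRuns r P), pvBFold bn ((pvRuns r P).filter (fun t => !pvLight t.2.2))) := by
  induction P generalizing r b bn with
  | nil =>
    simp only [pvFinish, pvRuns, pvClose, pvBFold, List.foldl]
    by_cases hl : pvLight r.2.2 <;> by_cases hb : pvBetter r bn <;>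
      simp [pvUpd, hl, hb, List.filter]
  | cons p t ih =>
    simp only [List.foldl_cons, pvStep, pvRuns]
    by_cases hc : (r.2.2 == p.2) = true
    · simp only [hc, if_true]
      exact ih _ _ _
    · rw [Bool.not_eq_true] at hc
      simp only [hc, Bool.false_eq_true, if_false]
      rw [ih]
      simp only [pvClose, pvBFold, List.foldl_cons, List.filter_cons]
      by_cases hl : pvLight r.2.2 <;> by_cases hb : pvBetter r bn <;>
        simp [pvUpd, hl, hb]

-- ---- the best-run update is insensitive to order on runs with distinct first indices ----

theorem pvBetter_some_iff (r b : PvRun) :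
    pvBetter r (some b) = true ↔ (b.1 < r.1 ∨ (r.1 = b.1 ∧ r.2.1 < b.2.1)) := by
  simp [pvBetter]

theorem pvBetter_asymm {x y : PvRun} (hxy : x.2.1 ≠ y.2.1) :
    pvBetter y (some x) = !pvBetter x (some y) := by
  cases hb : pvBetter x (some y) with
  | true =>
    have h1 := (pvBetter_some_iff x y).mp hb
    cases hyx : pvBetter y (some x) with
    | false => rfl
    | true =>
      have h2 := (pvBetter_some_iff y x).mp hyx
      omega
  | false =>
    have h1 : ¬ (y.1 < x.1 ∨ (x.1 = y.1 ∧ x.2.1 < y.2.1)) := by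
      rw [← pvBetter_some_iff]; simp [hb]
    cases hyx : pvBetter y (some x) with
    | true => rfl
    | false =>
      have h2 : ¬ (x.1 < y.1 ∨ (y.1 = x.1 ∧ y.2.1 < x.2.1)) := by
        rw [← pvBetter_some_iff]; simp [hyx]
      exfalso
      push_neg at h1 h2
      omega

theorem pvBetter_trans {x y : PvRun} {z : PvRun}
    (h1 : pvBetter x (some y) = true) (h2 : pvBetter y (some z) = true) :
    pvBetter x (some z) = true := by
  simp only [pvBetter, gt_iff_lt, Bool.or_eq_true, Bool.and_eq_true, decide_eq_true_eq,
    beq_iff_eq] at *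
  omega

theorem pvUpd_comm {x y : PvRun} (hxy : x = y ∨ x.2.1 ≠ y.2.1) (z : Option PvRun) :
    pvUpd (pvUpd z x) y = pvUpd (pvUpd z y) x := by
  rcases hxy with h | h
  · subst h; rfl
  · have hasym := pvBetter_asymm h
    cases z with
    | none =>
      have e1 : pvUpd none x = some x := rfl
      have e2 : pvUpd none y = some y := rfl
      rw [e1, e2]
      simp only [pvUpd]
      rw [hasym]
      cases hb : pvBetter x (some y) <;> simp
    | some z =>
      by_cases hx : pvBetter x (some z) = true <;> by_cases hy : pvBetter y (some z) = true
      · simp only [pvUpd, hx, hy, if_true]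
        rw [hasym]
        cases hb : pvBetter x (some y) <;> simp [hb]
      · simp only [pvUpd, hx, hy, if_true, if_false]
        have : pvBetter y (some x) = false := by
          cases hyx : pvBetter y (some x)
          · rfl
          · exact absurd (pvBetter_trans hyx hx) (by simp [hy])
        simp [this, hx]
      · simp only [pvUpd, hx, hy, if_true, if_false]
        have : pvBetter x (some y) = false := by
          cases hxy2 : pvBetter x (some y)
          · rfl
          · exact absurd (pvBetter_trans hxy2 hy) (by simp [hx])
        simp [this, hy]
      · simp [pvUpd, hx, hy]

theorem pvBFold_perm {L1 L2 : List PvRun} (hp : L1.Perm L2)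
    (hd : ∀ x ∈ L1, ∀ y ∈ L1, x = y ∨ x.2.1 ≠ y.2.1) (b : Option PvRun) :
    pvBFold b L1 = pvBFold b L2 :=
  hp.foldl_eq' (fun x hx y hy z => pvUpd_comm (hd x hx y hy) z) b

theorem pvBFold_some_isSome (r : PvRun) (L : List PvRun) (b : Option PvRun)
    (hb : b.isSome) : (pvBFold b L).isSome := by
  induction L generalizing b with
  | nil => exact hb
  | cons x t ih =>
    simp only [pvBFold, List.foldl_cons, pvUpd]
    split
    · exact ih _ (by simp)
    · exact ih _ hb

theorem pvBFold_none_isSome (L : List PvRun) (hL : L ≠ []) : (pvBFold none L).isSome := by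
  cases L with
  | nil => exact absurd rfl hL
  | cons x t =>
    simp only [pvBFold, List.foldl_cons, pvUpd, pvBetter, if_true]
    exact pvBFold_some_isSome x t _ (by simp)

-- ---- A's strict-count scan simulates the best-run fold on fst-increasing color lists ----

theorem pvBest_sim (xs : List (Int × Int × Int)) :
    ∀ (M : List (Int × Int × Int)) (bacc : Option PvRun),
    M.Pairwise (fun c d => pvFst xs c < pvFst xs d) →
    (∀ c ∈ M, ∀ r, bacc = some r → r.2.1 < pvFst xs c) →
    (M.map (fun c => (c, (xs.count c : Int)))).foldl pvAUpd
        (bacc.map (fun r => (r.2.2, r.1)))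
      = ((M.map (pvTriple xs)).foldl pvUpd bacc).map (fun r => (r.2.2, r.1)) := by
  intro M
  induction M with
  | nil => intro bacc _ _; rfl
  | cons c M ih =>
    intro bacc hpw hlt
    rw [List.pairwise_cons] at hpw
    simp only [List.map_cons, List.foldl_cons]
    cases bacc with
    | none =>
      have e1 : pvAUpd (Option.map (fun r => (r.2.2, r.1)) (none : Option PvRun))
          (c, (xs.count c : Int)) = some (c, (xs.count c : Int)) := rfl
      have e2 : pvUpd none (pvTriple xs c) = some (pvTriple xs c) := rfl
      have e3 : some (c, (xs.count c : Int))
          = Option.map (fun (r : PvRun) => (r.2.2, r.1)) (some (pvTriple xs c)) := rfl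
      rw [e1, e2, e3]
      exact ih (some (pvTriple xs c)) hpw.2
        (fun d hd r hr => by
          cases Option.some.inj hr
          simpa [pvTriple] using hpw.1 d hd)
    | some b =>
      have hblt : b.2.1 < pvFst xs c := hlt c (by simp) b rfl
      have e1 : pvAUpd (Option.map (fun r => (r.2.2, r.1)) (some b)) (c, (xs.count c : Int))
          = if (xs.count c : Int) > b.1 then some (c, (xs.count c : Int)) else some (b.2.2, b.1) := rfl
      have e2 : pvUpd (some b) (pvTriple xs c)
          = if (xs.count c : Int) > b.1 then some (pvTriple xs c) else some b := by
        simp only [pvUpd, pvTriple, gt_iff_lt]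
        by_cases h1 : b.1 < (xs.count c : Int)
        · have : pvBetter ((xs.count c : Int), pvFst xs c, c) (some b) = true := by
            rw [pvBetter_some_iff]; left; exact h1
          simp [this, h1]
        · have : pvBetter ((xs.count c : Int), pvFst xs c, c) (some b) = false := by
            rw [← Bool.not_eq_true, pvBetter_some_iff]
            show ¬ (b.1 < (xs.count c : Int) ∨ ((xs.count c : Int) = b.1 ∧ pvFst xs c < b.2.1))
            omega
          simp [this, h1]
      rw [e1, e2]
      by_cases hgt : (xs.count c : Int) > b.1
      · rw [if_pos hgt, if_pos hgt]
        have e3 : some (c, (xs.count c : Int))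
            = Option.map (fun (r : PvRun) => (r.2.2, r.1)) (some (pvTriple xs c)) := rfl
        rw [e3]
        exact ih (some (pvTriple xs c)) hpw.2
          (fun d hd r hr => by
            cases Option.some.inj hr
            simpa [pvTriple] using hpw.1 d hd)
      · rw [if_neg hgt, if_neg hgt]
        have e3 : some (b.2.2, b.1)
            = Option.map (fun (r : PvRun) => (r.2.2, r.1)) (some b) := rfl
        rw [e3]
        exact ih (some b) hpw.2
          (fun d hd r hr => by
            cases Option.some.inj hr
            have := hpw.1 d hd
            omega)

-- placeholder for remaining development

-- ---- color order: helper facts ----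

theorem pvColorLt_irrefl (c : Int × Int × Int) : ¬ pvColorLt c c := by
  simp only [pvColorLt]; omega

theorem pvColorLt_trans {a b c : Int × Int × Int}
    (h1 : pvColorLt a b) (h2 : pvColorLt b c) : pvColorLt a c := by
  simp only [pvColorLt] at *; omega

theorem pvColorLt_ne {a b : Int × Int × Int} (h : pvColorLt a b) : a ≠ b := by
  intro he; subst he; exact pvColorLt_irrefl a h

-- ---- first-occurrence indices: basic facts ----

theorem pvFst_spec {xs : List (Int × Int × Int)} {c : Int × Int × Int} (hc : c ∈ xs) :
    ∃ k : Nat, pvFst xs c = (k : Int) ∧ ∃ (hk : k < xs.length), xs[k] = c ∧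
      ∀ j (hj : j < k), xs[j] ≠ c := by
  have hs : (PySem.List.index? xs c).isSome = true := (PySem.List.index?_isSome_iff xs c).mpr hc
  obtain ⟨k, hk⟩ := Option.isSome_iff_exists.mp hs
  obtain ⟨hlt, hget, hmin⟩ := PySem.List.getElem_of_index?_eq_some hk
  refine ⟨k, ?_, hlt, hget, hmin⟩
  simp only [pvFst]
  rw [hk]
  rfl

theorem pvFst_inj {xs : List (Int × Int × Int)} {c d : Int × Int × Int}
    (hc : c ∈ xs) (hd : d ∈ xs) (h : pvFst xs c = pvFst xs d) : c = d := by
  obtain ⟨k, hk, hklt, hkget, _⟩ := pvFst_spec hc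
  obtain ⟨m, hm, hmlt, hmget, _⟩ := pvFst_spec hd
  have : k = m := by omega
  subst this
  rw [← hkget, ← hmget]

theorem pvFst_lt_length {xs : List (Int × Int × Int)} {c : Int × Int × Int} (hc : c ∈ xs) :
    pvFst xs c < (xs.length : Int) := by
  obtain ⟨k, hk, hklt, _, _⟩ := pvFst_spec hc
  omega

theorem pvFst_append_of_mem {xs : List (Int × Int × Int)} (t : List (Int × Int × Int))
    {c : Int × Int × Int} (hc : c ∈ xs) : pvFst (xs ++ t) c = pvFst xs c := by
  simp only [pvFst]
  rw [PySem.List.index?_append_of_mem t hc]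

-- distinct colors in first-occurrence order have strictly increasing first indices
theorem pvOfList_pairwise (xs : List (Int × Int × Int)) :
    (PySem.Set.ofList xs).Pairwise (fun c d => pvFst xs c < pvFst xs d) := by
  induction xs using List.reverseRecOn with
  | nil => simp [PySem.Set.ofList_nil]
  | append_singleton l x ih =>
    rw [PySem.Set.ofList_append_singleton]
    have htransfer : (PySem.Set.ofList l).Pairwise (fun c d => pvFst (l ++ [x]) c < pvFst (l ++ [x]) d) :=
      ih.imp_of_mem (fun {a b} ha hb hab => by
        rw [pvFst_append_of_mem [x] ((PySem.Set.mem_ofList l a).mp ha),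
          pvFst_append_of_mem [x] ((PySem.Set.mem_ofList l b).mp hb)]
        exact hab)
    by_cases hx : x ∈ l
    · have hcont : (PySem.Set.ofList l).contains x = true := by
        simp only [PySem.Set.contains, List.contains_eq_mem, decide_eq_true_eq]
        exact (PySem.Set.mem_ofList l x).mpr hx
      simp only [PySem.Set.add, hcont, if_true]
      exact htransfer
    · have hcont : (PySem.Set.ofList l).contains x = false := by
        simp only [PySem.Set.contains, List.contains_eq_mem, decide_eq_false_iff_not,
          PySem.Set.mem_ofList]
        exact hx
      simp only [PySem.Set.add, hcont, Bool.false_eq_true, if_false]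
      rw [List.pairwise_append]
      refine ⟨htransfer, by simp, ?_⟩
      intro a ha b hb
      simp only [List.mem_singleton] at hb
      rw [hb]
      have hal : a ∈ l := (PySem.Set.mem_ofList l a).mp ha
      rw [pvFst_append_of_mem [x] hal]
      have h1 : pvFst l a < (l.length : Int) := pvFst_lt_length hal
      have h2 : pvFst (l ++ [x]) x = (l.length : Int) := by
        simp only [pvFst]
        rw [PySem.List.index?_append_singleton_self l x hx]
        rfl
      omega

-- dedup commutes with filtering
theorem pvOfList_filter (q : (Int × Int × Int) → Bool) (L : List (Int × Int × Int)) :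
    PySem.Set.ofList (L.filter q) = (PySem.Set.ofList L).filter q := by
  induction L with
  | nil => simp [PySem.Set.ofList_nil]
  | cons x L ih =>
    rw [List.filter_cons, PySem.Set.ofList_cons, PySem.Set.discard]
    by_cases hq : q x = true
    · rw [if_pos hq, PySem.Set.ofList_cons, PySem.Set.discard, ih, List.filter_cons_of_pos hq,
        List.filter_filter, List.filter_filter]
      congr 1
      apply List.filter_congr
      intro y _
      rw [Bool.and_comm]
    · rw [if_neg hq, List.filter_cons_of_neg hq, ih, List.filter_filter]
      apply List.filter_congr
      intro y _
      by_cases hyx : (y == x) = true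
      · have : y = x := by simpa using hyx
        subst this
        simp [hq]
      · simp [hyx]

-- ---- facts about the key-sorted pair list ----

-- in a key-sorted list, find? by color returns the pair of that color with least index
theorem pvFind_min {P : List (Int × (Int × Int × Int))}
    (hs : P.Pairwise (fun p q => pvKey p ≤ pvKey q)) :
    ∀ {i : Int} {d : Int × Int × Int}, (i, d) ∈ P →
    ∃ j, P.find? (fun p => p.2 == d) = some (j, d) ∧ j ≤ i := by
  induction P with
  | nil => intro i d h; cases h
  | cons q t ih =>
    intro i d hm
    rw [List.pairwise_cons] at hs
    by_cases hq : (q.2 == d) = true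
    · have hqd : q.2 = d := by simpa using hq
      refine ⟨q.1, ?_, ?_⟩
      · rw [List.find?_cons_of_pos (p := fun p : Int × (Int × Int × Int) => p.2 == d) hq]
        cases q
        simp only at hqd
        rw [hqd]
      · rcases List.mem_cons.mp hm with h | h
        · rw [← h]
        · have hkey := hs.1 _ h
          rw [pvKey_le_iff] at hkey
          rcases hkey with h2 | h2
          · rw [hqd] at h2
            exact absurd h2 (pvColorLt_irrefl d)
          · exact h2.2
    · rw [List.find?_cons_of_neg (p := fun p : Int × (Int × Int × Int) => p.2 == d) hq]
      rcases List.mem_cons.mp hm with h | h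
      · exfalso; apply hq; rw [← h]; simp
      · exact ih hs.2 h

-- the run decomposition of a key-sorted tail with open run (m, f, c)
theorem pvRuns_sorted :
    ∀ (T : List (Int × (Int × Int × Int))) (m f : Int) (c : Int × Int × Int),
    T.Pairwise (fun p q => pvKey p ≤ pvKey q) →
    (∀ p ∈ T, pvColorLt c p.2 ∨ c = p.2) →
    pvRuns (m, f, c) T
      = (m + (T.countP (fun p => p.2 == c) : Int), f, c)
        :: (PySem.Set.ofList ((T.filter (fun p => !(p.2 == c))).map (·.2))).map
            (fun d => ((T.countP (fun p => p.2 == d) : Int), pvIdxFirst T d, d)) := by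
  intro T
  induction T with
  | nil => intro m f c _ _; simp [pvRuns, PySem.Set.ofList_nil]
  | cons p t ih =>
    intro m f c hs hc
    rw [List.pairwise_cons] at hs
    have htcol : ∀ q ∈ t, pvColorLt p.2 q.2 ∨ p.2 = q.2 := fun q hq => by
      have hkey := hs.1 q hq
      rw [pvKey_le_iff] at hkey
      tauto
    by_cases hpc : (c == p.2) = true
    · -- the head pair extends the open run
      have hcp : c = p.2 := by simpa using hpc
      subst hcp
      simp only [pvRuns, BEq.rfl, if_true]
      rw [ih (m + 1) f p.2 hs.2 htcol]
      have hfilter : (p :: t).filter (fun q => !(q.2 == p.2)) = t.filter (fun q => !(q.2 == p.2)) := by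
        rw [List.filter_cons_of_neg (by simp)]
      rw [hfilter]
      congr 1
      · -- heads agree
        rw [List.countP_cons]
        simp only [beq_self_eq_true, if_true]
        rw [Prod.mk.injEq, Prod.mk.injEq]
        refine ⟨by push_cast; ring, rfl, rfl⟩
      · -- tails agree: the remaining colors differ from c, so head p changes nothing
        apply List.map_congr_left
        intro d hd
        have hdc : ¬ (d == p.2) = true := by
          rw [PySem.Set.mem_ofList] at hd
          obtain ⟨q, hq, hqd⟩ := List.mem_map.mp hd
          have := List.of_mem_filter hq
          rw [← hqd]
          simp only [Bool.not_eq_eq_eq_not, Bool.not_true] at this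
          simp [this]
        have hcd : ¬ (p.2 == d) = true := by
          simp only [beq_iff_eq] at hdc ⊢
          exact fun h => hdc (h.symm)
        congr 1
        · rw [List.countP_cons]
          simp [hcd]
        · rw [Prod.mk.injEq]
          refine ⟨?_, rfl⟩
          simp only [pvIdxFirst]
          rw [List.find?_cons_of_neg (p := fun q : Int × (Int × Int × Int) => q.2 == d) hcd]
    · -- the head pair closes the open run and starts a fresh one
      have hne : c ≠ p.2 := by simpa using hpc
      have hclt : pvColorLt c p.2 := by
        rcases hc p (by simp) with h | h
        · exact h
        · exact absurd h hne
      have htab : ∀ q ∈ t, pvColorLt c q.2 := fun q hq => by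
        rcases htcol q hq with h | h
        · exact pvColorLt_trans hclt h
        · rw [← h]; exact hclt
      have hcnt0 : (p :: t).countP (fun q => q.2 == c) = 0 := by
        rw [List.countP_eq_zero]
        intro q hq
        rcases List.mem_cons.mp hq with h | h
        · subst h
          simpa using fun h => (pvColorLt_ne hclt) h.symm
        · simpa using fun h2 => (pvColorLt_ne (htab q h)) h2.symm
      have hkeepall : (p :: t).filter (fun q => !(q.2 == c)) = p :: t := by
        rw [List.filter_eq_self]
        intro q hq
        rcases List.mem_cons.mp hq with h | h
        · subst h
          simpa using fun h => (pvColorLt_ne hclt) h.symm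
        · simpa using fun h2 => (pvColorLt_ne (htab q h)) h2.symm
      simp only [pvRuns, hpc, Bool.false_eq_true, if_false]
      rw [ih 1 p.1 p.2 hs.2 htcol, hcnt0, hkeepall]
      simp only [List.map_cons, PySem.Set.ofList_cons, PySem.Set.discard, List.map_cons]
      congr 1
      · simp
      congr 1
      · rw [Prod.mk.injEq, Prod.mk.injEq]
        refine ⟨?_, ?_, rfl⟩
        · rw [List.countP_cons]
          simp only [beq_self_eq_true, if_true]
          push_cast
          ring
        · simp only [pvIdxFirst]
          rw [List.find?_cons_of_pos (p := fun q : Int × (Int × Int × Int) => q.2 == p.2)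
            (by simp)]
          rfl
      · have hbase : (t.filter (fun q => !(q.2 == p.2))).map (fun q => q.2)
            = (t.map (fun q => q.2)).filter (fun d => !(d == p.2)) := by
          rw [List.filter_map]
          rfl
        rw [hbase, pvOfList_filter]
        apply List.map_congr_left
        intro d hd
        have hdp : ¬ (p.2 == d) = true := by
          have := List.of_mem_filter hd
          simp only [Bool.not_eq_eq_eq_not, Bool.not_true, beq_eq_false_iff_ne] at this
          simp only [beq_iff_eq]
          exact fun h => this h.symm
        rw [Prod.mk.injEq, Prod.mk.injEq]
        refine ⟨?_, ?_, rfl⟩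
        · rw [List.countP_cons]
          simp [hdp]
        · simp only [pvIdxFirst]
          rw [List.find?_cons_of_neg (p := fun q : Int × (Int × Int × Int) => q.2 == d) hdp]

-- ---- bridging the sorted pair list to counts and first indices of xs ----

theorem pvMostCommon1_eq_foldl (l : List ((Int × Int × Int) × Int)) :
    pvMostCommon1 l = l.foldl pvAUpd none := rfl

theorem pvCountP_sorted (xs : List (Int × Int × Int)) (d : Int × Int × Int) :
    (PySem.List.sorted (PySem.List.enumerate xs) pvKey false).countP (fun q => q.2 == d)
      = xs.count d := by
  rw [(PySem.List.sorted_perm (PySem.List.enumerate xs) pvKey false).countP_eq]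
  have h1 : (PySem.List.enumerate xs).countP (fun q => q.2 == d)
      = ((PySem.List.enumerate xs).map (fun q => q.2)).countP (fun y => y == d) := by
    rw [List.countP_map]
    rfl
  rw [h1, PySem.List.map_snd_enumerate, List.count]

theorem pvIdxFirst_sorted {xs : List (Int × Int × Int)} {d : Int × Int × Int} (hd : d ∈ xs) :
    ∃ j, (PySem.List.sorted (PySem.List.enumerate xs) pvKey false).find? (fun q => q.2 == d)
        = some (j, d) ∧ j = pvFst xs d := by
  obtain ⟨k, hk, hklt, hkget, hkmin⟩ := pvFst_spec hd
  have hmemE : ((k : Int), d) ∈ PySem.List.enumerate xs 0 := by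
    rw [PySem.List.mem_enumerate_iff]
    exact ⟨k, hklt, by rw [zero_add, hkget]⟩
  have hperm := PySem.List.sorted_perm (PySem.List.enumerate xs) pvKey false
  have hmemP : ((k : Int), d) ∈ PySem.List.sorted (PySem.List.enumerate xs) pvKey false :=
    hperm.mem_iff.mpr hmemE
  obtain ⟨j, hfind, hji⟩ := pvFind_min (PySem.List.sorted_pairwise (PySem.List.enumerate xs) pvKey) hmemP
  have hjP : (j, d) ∈ PySem.List.sorted (PySem.List.enumerate xs) pvKey false :=
    List.mem_of_find?_eq_some hfind
  have hjE : (j, d) ∈ PySem.List.enumerate xs 0 := hperm.mem_iff.mp hjP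
  rw [PySem.List.mem_enumerate_iff] at hjE
  obtain ⟨k', hk'lt, hk'⟩ := hjE
  have hj : j = (k' : Int) := by
    have := congrArg Prod.fst hk'
    simpa using this
  have hdk' : xs[k'] = d := by
    have := congrArg Prod.snd hk'
    simpa using this.symm
  have hk'k : k' = k := by
    by_cases hlt : k' < k
    · exact absurd hdk' (hkmin k' hlt)
    · by_cases hlt2 : k < k'
      · exfalso
        rw [hj] at hji
        omega
      · omega
  refine ⟨j, hfind, ?_⟩
  rw [hj, hk'k, hk]

-- the run list of the sorted pair list is exactly one (count, first, color) triple per distinct color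
theorem pvRuns_eq_map_triple (xs : List (Int × Int × Int)) {p0 : Int × (Int × Int × Int)}
    {T : List (Int × (Int × Int × Int))}
    (hP : PySem.List.sorted (PySem.List.enumerate xs) pvKey false = p0 :: T) :
    pvRuns (1, p0.1, p0.2) T
      = (PySem.Set.ofList ((p0 :: T).map (·.2))).map (pvTriple xs) := by
  have hpw : (p0 :: T).Pairwise (fun p q => pvKey p ≤ pvKey q) := by
    rw [← hP]; exact PySem.List.sorted_pairwise (PySem.List.enumerate xs) pvKey
  rw [List.pairwise_cons] at hpw
  have hcond : ∀ q ∈ T, pvColorLt p0.2 q.2 ∨ p0.2 = q.2 := fun q hq => by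
    have h := hpw.1 q hq
    rw [pvKey_le_iff] at h
    tauto
  have hmem : ∀ d, d ∈ (p0 :: T).map (fun q => q.2) → d ∈ xs := fun d hd => by
    have hpm : ((p0 :: T).map (fun q => q.2)).Perm xs := by
      have h1 := (PySem.List.sorted_perm (PySem.List.enumerate xs) pvKey false).map
        (fun q : Int × (Int × Int × Int) => q.2)
      rw [hP] at h1
      simpa [PySem.List.map_snd_enumerate] using h1
    exact hpm.mem_iff.mp hd
  rw [pvRuns_sorted T 1 p0.1 p0.2 hpw.2 hcond]
  rw [List.map_cons, PySem.Set.ofList_cons, PySem.Set.discard, List.map_cons]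
  congr 1
  · -- head triple
    have hp2mem : p0.2 ∈ xs := hmem p0.2 (by simp)
    obtain ⟨j, hfind, hj⟩ := pvIdxFirst_sorted hp2mem
    rw [hP, List.find?_cons_of_pos (p := fun q : Int × (Int × Int × Int) => q.2 == p0.2) (by simp)]
      at hfind
    have hj2 : p0.1 = j := congrArg Prod.fst (Option.some.inj hfind)
    have hcnt : xs.count p0.2 = ((p0 :: T).countP (fun q => q.2 == p0.2)) := by
      rw [← pvCountP_sorted xs p0.2, hP]
    simp only [pvTriple, hcnt, List.countP_cons, beq_self_eq_true, if_true]
    rw [Prod.mk.injEq, Prod.mk.injEq]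
    refine ⟨by push_cast; ring, by rw [hj2, hj], rfl⟩
  · -- tail triples
    have hbase : (T.filter (fun q => !(q.2 == p0.2))).map (fun q => q.2)
        = (T.map (fun q => q.2)).filter (fun d => !(d == p0.2)) := by
      rw [List.filter_map]
      rfl
    rw [hbase, pvOfList_filter]
    apply List.map_congr_left
    intro d hd
    have hdp : ¬ (p0.2 == d) = true := by
      have := List.of_mem_filter hd
      simp only [Bool.not_eq_eq_eq_not, Bool.not_true, beq_eq_false_iff_ne] at this
      simp only [beq_iff_eq]
      exact fun h => this h.symm
    have hdmem : d ∈ xs := by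
      apply hmem
      have := List.mem_filter.mp hd
      rw [PySem.Set.mem_ofList] at this
      simp [this.1]
    obtain ⟨j, hfind, hj⟩ := pvIdxFirst_sorted hdmem
    rw [hP, List.find?_cons_of_neg (p := fun q : Int × (Int × Int × Int) => q.2 == d) hdp] at hfind
    have hcnt : xs.count d = ((p0 :: T).countP (fun q => q.2 == d)) := by
      rw [← pvCountP_sorted xs d, hP]
    simp only [pvTriple, hcnt, List.countP_cons, hdp, if_false]
    rw [Prod.mk.injEq, Prod.mk.injEq]
    refine ⟨by simp, ?_, rfl⟩
    simp only [pvIdxFirst, hfind]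
    rw [← hj]
    rfl

-- ---- A-side plumbing (filtered dict, nonempty counter) ----

-- A's filtered-dict loop over a fresh-keyed items list yields exactly the filtered list as items
theorem pvFiltered_items (l : List ((Int × Int × Int) × Int)) (d : PySem.Dict (Int × Int × Int) Int)
    (hnd : (l.map (·.1)).Nodup) (hfresh : ∀ p ∈ l, d.contains p.1 = false) :
    (l.foldl
      (fun d p => if !(p.1.1 > 200 && p.1.2.1 > 200 && p.1.2.2 > 200) then d.insert p.1 p.2 else d)
      d).items
    = d.items ++ l.filter (fun p => !(p.1.1 > 200 && p.1.2.1 > 200 && p.1.2.2 > 200)) := by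
  induction l generalizing d with
  | nil => simp
  | cons p l ih =>
    simp only [List.map_cons, List.nodup_cons] at hnd
    have hfp : d.contains p.1 = false := hfresh p (by simp)
    simp only [List.foldl_cons, List.filter_cons]
    by_cases hc : (!(p.1.1 > 200 && p.1.2.1 > 200 && p.1.2.2 > 200)) = true
    · rw [if_pos hc]
      rw [ih (d.insert p.1 p.2) hnd.2]
      · rw [PySem.Dict.items_insert_of_not_contains d p.2 hfp]
        simp [hc]
      · intro q hq
        rw [PySem.Dict.contains_insert]
        have hne : q.1 ≠ p.1 := by
          intro h
          exact hnd.1 (h ▸ List.mem_map_of_mem hq)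
        simp [hne, hfresh q (List.mem_cons_of_mem _ hq)]
    · rw [if_neg hc, ih d hnd.2 (fun q hq => hfresh q (List.mem_cons_of_mem _ hq))]
      simp at hc
      simp [hc]

theorem pvCounter_items_ne_nil (xs : List (Int × Int × Int)) (h : xs ≠ []) :
    (PySem.Dict.counter xs).items ≠ [] := by
  rw [PySem.Dict.items_counter]
  simp only [ne_eq, List.map_eq_nil_iff]
  intro hofl
  cases xs with
  | nil => exact h rfl
  | cons x xs => rw [PySem.Set.ofList_cons] at hofl; exact List.cons_ne_nil _ _ hofl

-- the filtered items list is the non-light colors, paired with their counts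
theorem pvFilter_items_map (xs : List (Int × Int × Int)) :
    ((PySem.Set.ofList xs).map (fun k => (k, (xs.count k : Int)))).filter
        (fun p => !(p.1.1 > 200 && p.1.2.1 > 200 && p.1.2.2 > 200))
      = ((PySem.Set.ofList xs).filter (fun c => !pvLight c)).map
          (fun k => (k, (xs.count k : Int))) := by
  rw [List.filter_map]
  rfl

-- ===== VERDICT (by name: the statement is the Claim_ definition above) =====
theorem find_most_repeated_color_in_box_spec : Claim_equal_find_most_repeated_color_in_box := by
  intro xs ex _
  show find_most_repeated_color_in_box xs ex = find_most_repeated_color_in_box_alt xs ex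
  rcases eq_or_ne xs [] with hxs | hxs
  · subst hxs; rfl
  -- A-side: the counter's items and the filtered dict's items
  have hitems : (PySem.Dict.counter xs).items
      = (PySem.Set.ofList xs).map (fun k => (k, (xs.count k : Int))) := PySem.Dict.items_counter xs
  have hnodup : (((PySem.Dict.counter xs).items).map (·.1)).Nodup := by
    have := PySem.Dict.nodup_keys_counter (xs := xs)
    simpa [PySem.Dict.keys] using this
  have hfilt := pvFiltered_items (PySem.Dict.counter xs).items PySem.Dict.empty hnodup
    (fun p _ => PySem.Dict.contains_empty p.1)
  have hempty : (PySem.Dict.empty : PySem.Dict (Int × Int × Int) Int).items = [] := rfl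
  rw [hempty, List.nil_append] at hfilt
  rw [hitems, pvFilter_items_map] at hfilt
  rw [← hitems] at hfilt
  have hcne := pvCounter_items_ne_nil xs hxs
  -- B-side: the sorted pair list is nonempty
  rcases hS : PySem.List.sorted (PySem.List.enumerate xs) pvKey false with _ | ⟨p0, T⟩
  · exfalso
    have hlen : (PySem.List.sorted (PySem.List.enumerate xs) pvKey false).length = xs.length := by
      rw [PySem.List.length_sorted, PySem.List.length_enumerate]
    rw [hS] at hlen
    exact hxs (List.eq_nil_of_length_eq_zero hlen.symm)
  -- B-side: the fold, finished, is the pair of best-run folds over the run list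
  have hsome := pvFoldl_step_some T none none (1, p0.1, p0.2)
  obtain ⟨cur, hcur⟩ := Option.isSome_iff_exists.mp hsome
  have hfold : pvClose cur (List.foldl pvStep (none, none, some (1, p0.1, p0.2)) T).1
      (List.foldl pvStep (none, none, some (1, p0.1, p0.2)) T).2.1
      = (pvBFold none (pvRuns (1, p0.1, p0.2) T),
         pvBFold none ((pvRuns (1, p0.1, p0.2) T).filter (fun t => !pvLight t.2.2))) := by
    have h := pvFoldl_finish T (1, p0.1, p0.2) none none
    unfold pvFinish at h
    rw [hcur] at h
    exact h
  -- the run list is one triple per distinct color, a permutation of A's color list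
  have hR := pvRuns_eq_map_triple xs hS
  have hpermC : ((PySem.Set.ofList ((p0 :: T).map (·.2))).Perm (PySem.Set.ofList xs)) := by
    have hpm : ((p0 :: T).map (fun q => q.2)).Perm xs := by
      have h1 := (PySem.List.sorted_perm (PySem.List.enumerate xs) pvKey false).map
        (fun q : Int × (Int × Int × Int) => q.2)
      rw [hS] at h1
      simpa [PySem.List.map_snd_enumerate] using h1
    rw [List.perm_ext_iff_of_nodup (PySem.Set.nodup_ofList _) (PySem.Set.nodup_ofList _)]
    intro a
    rw [PySem.Set.mem_ofList, PySem.Set.mem_ofList, hpm.mem_iff]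
  have hmemxs : ∀ c ∈ PySem.Set.ofList xs, c ∈ xs := fun c hc => (PySem.Set.mem_ofList xs c).mp hc
  have hdistGen : ∀ (C : List (Int × Int × Int)), (∀ c ∈ C, c ∈ xs) →
      ∀ x ∈ C.map (pvTriple xs), ∀ y ∈ C.map (pvTriple xs), x = y ∨ x.2.1 ≠ y.2.1 := by
    intro C hC x hx y hy
    obtain ⟨c, hc, rfl⟩ := List.mem_map.mp hx
    obtain ⟨d, hd, rfl⟩ := List.mem_map.mp hy
    by_cases hfst : pvFst xs c = pvFst xs d
    · left
      rw [pvFst_inj (hC c hc) (hC d hd) hfst]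
    · right
      simpa [pvTriple] using hfst
  have hmemC : ∀ c ∈ PySem.Set.ofList ((p0 :: T).map (·.2)), c ∈ xs := fun c hc =>
    hmemxs c (hpermC.mem_iff.mp hc)
  -- fold equalities (whole list, and non-light sublist)
  have hfold1 : pvBFold none (pvRuns (1, p0.1, p0.2) T)
      = pvBFold none ((PySem.Set.ofList xs).map (pvTriple xs)) := by
    rw [hR]
    exact pvBFold_perm (hpermC.map _) (hdistGen _ hmemC) none
  have hRnl : (pvRuns (1, p0.1, p0.2) T).filter (fun t => !pvLight t.2.2)
      = ((PySem.Set.ofList ((p0 :: T).map (·.2))).filter (fun c => !pvLight c)).map (pvTriple xs) := by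
    rw [hR, List.filter_map]
    rfl
  have hfold2 : pvBFold none ((pvRuns (1, p0.1, p0.2) T).filter (fun t => !pvLight t.2.2))
      = pvBFold none (((PySem.Set.ofList xs).filter (fun c => !pvLight c)).map (pvTriple xs)) := by
    rw [hRnl]
    exact pvBFold_perm ((hpermC.filter _).map _)
      (hdistGen _ (fun c hc => hmemC c (List.mem_filter.mp hc).1)) none
  -- A's scan simulated by the best-run fold
  have hA_S : pvMostCommon1 ((PySem.Set.ofList xs).map (fun k => (k, (xs.count k : Int))))
      = (pvBFold none ((PySem.Set.ofList xs).map (pvTriple xs))).map (fun r => (r.2.2, r.1)) := by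
    rw [pvMostCommon1_eq_foldl]
    exact pvBest_sim xs (PySem.Set.ofList xs) none (pvOfList_pairwise xs)
      (fun c _ r hr => by cases hr)
  have hA_F : pvMostCommon1 (((PySem.Set.ofList xs).filter (fun c => !pvLight c)).map
        (fun k => (k, (xs.count k : Int))))
      = (pvBFold none (((PySem.Set.ofList xs).filter (fun c => !pvLight c)).map
          (pvTriple xs))).map (fun r => (r.2.2, r.1)) := by
    rw [pvMostCommon1_eq_foldl]
    exact pvBest_sim xs _ none ((pvOfList_pairwise xs).filter _) (fun c _ r hr => by cases hr)
  -- unfold both ports and discharge by cases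
  unfold find_most_repeated_color_in_box find_most_repeated_color_in_box_alt
  rw [if_neg hxs, if_neg hxs]
  simp only [hS, List.foldl_cons]
  have hstep0 : pvStep (none, none, none) p0 = (none, none, some (1, p0.1, p0.2)) := rfl
  rw [hstep0]
  simp only [hcur]
  rw [hfold]
  cases ex with
  | false =>
    simp only [Bool.false_and, Bool.false_eq_true, if_false]
    rw [if_neg hcne, hitems, hA_S, hfold1]
    cases hv : pvBFold none ((PySem.Set.ofList xs).map (pvTriple xs)) <;> simp [hv]
  | true =>
    rw [if_pos rfl]
    by_cases hFl : (PySem.Set.ofList xs).filter (fun c => !pvLight c) = []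
    · -- every color is light: both sides fall back to the overall best
      have hCfe : (PySem.Set.ofList ((p0 :: T).map (·.2))).filter (fun c => !pvLight c) = [] := by
        have := hpermC.filter (fun c => !pvLight c)
        rw [hFl] at this
        exact this.eq_nil
      have hbnone : pvBFold none ((pvRuns (1, p0.1, p0.2) T).filter (fun t => !pvLight t.2.2))
          = none := by rw [hRnl, hCfe]; rfl
      rw [hfilt, hFl]
      simp only [List.map_nil, ne_eq, not_true_eq_false, if_false, hbnone, Option.isSome_none,
        Bool.and_false, Bool.false_eq_true]
      rw [if_neg hcne, hitems, hA_S, hfold1]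
      cases hv : pvBFold none ((PySem.Set.ofList xs).map (pvTriple xs)) <;> simp [hv]
    · -- a non-light color exists: both sides pick the best non-light run
      have hfe : ((PySem.Set.ofList xs).filter (fun c => !pvLight c)).map
          (fun k => (k, (xs.count k : Int))) ≠ [] := by
        simp only [ne_eq, List.map_eq_nil_iff]
        exact hFl
      have hbsome : (pvBFold none ((pvRuns (1, p0.1, p0.2) T).filter
          (fun t => !pvLight t.2.2))).isSome = true := by
        rw [hfold2]
        apply pvBFold_none_isSome
        simp only [ne_eq, List.map_eq_nil_iff]
        exact hFl
      rw [hfilt, if_pos hfe, hfilt, if_neg hfe, hfilt]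
      simp only [hbsome, Bool.and_true, if_true]
      rw [hA_F, hfold2]
      cases hv : pvBFold none (((PySem.Set.ofList xs).filter (fun c => !pvLight c)).map
        (pvTriple xs)) <;> simp [hv]
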